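-- pv_equiv track=rewrite | github.com/zulufun/CA_Manager | backend/api/v2/search.py | _extract_cn
-- ===== SOURCE A (Python) =====
-- def _extract_cn(subject):
--     """Extract CN from subject string"""
--     if not subject:
--         return None
--     for part in subject.split(','):
--         part = part.strip()
--         if part.upper().startswith('CN='):
--             return part[3:]
--     return None
-- ===== SOURCE B (Python) =====
-- def _extract_cn(subject):
--     """Extract CN from subject string"""
--     if not subject:
--         return None
--     d = {}
--     for part in subject.split(','):
--         part = part.strip()
--         if '=' in part:
--             key, value = part.split('=', 1)
--             key = key.upper()
--             if key not in d:
--                 d[key] = value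
--     return d.get('CN')
-- ===== Notes on version B (the rewrite author's own statement) =====
-- stated objective: idiomatic
-- what changed: Instead of scanning the comma-separated parts for a common-name prefix and returning early, B parses the whole subject into a first-occurrence-wins dict keyed by the uppercased attribute name (splitting each part once at the equals sign) and finishes with a single dictionary lookup of the common-name key.
import Mathlib
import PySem

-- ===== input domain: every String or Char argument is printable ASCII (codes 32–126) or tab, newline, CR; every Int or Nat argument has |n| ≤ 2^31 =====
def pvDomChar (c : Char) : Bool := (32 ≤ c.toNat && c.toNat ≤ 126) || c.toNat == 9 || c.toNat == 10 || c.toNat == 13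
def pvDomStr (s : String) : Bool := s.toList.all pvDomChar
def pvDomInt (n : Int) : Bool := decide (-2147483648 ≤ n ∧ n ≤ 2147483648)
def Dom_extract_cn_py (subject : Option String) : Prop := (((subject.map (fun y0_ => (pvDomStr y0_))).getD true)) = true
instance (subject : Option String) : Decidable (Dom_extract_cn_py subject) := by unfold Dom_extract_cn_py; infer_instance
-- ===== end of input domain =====

-- B replaces A's scan-and-early-return with building a first-occurrence dict of uppercased
-- attribute names (split on '=' with maxsplit=1) followed by a single d.get('CN') lookup
-- (objective: idiomatic DN parsing; same asymptotic cost).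

-- ===== PORT A =====
-- the 'for part in …: return part[3:]' loop of A, over the split parts
def pvAScan : List (List Char) → Option (List Char)
  | [] => none
  | p :: rest =>
    let part := PySem.Chars.strip p
    if PySem.Chars.startswith (PySem.Chars.upper part) ['C', 'N', '='] then
      some (PySem.List.slice part (some 3) none)
    else pvAScan rest

def extract_cn_py (subject : Option String) : Option String :=
  match subject with
  | none => none
  | some s =>
    if s.toList = [] then none   -- 'if not subject: return None' (empty string is falsy)
    else (pvAScan (PySem.Chars.splitOn s.toList [','])).map String.ofList

-- ===== PORT B =====
-- one iteration of B's dict-building loop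
def pvBStep (d : PySem.Dict (List Char) (List Char)) (p : List Char) :
    PySem.Dict (List Char) (List Char) :=
  let part := PySem.Chars.strip p
  if PySem.Chars.isIn ['='] part then
    match PySem.Chars.splitOnMax part ['='] 1 with
    | [key, value] =>
      let keyU := PySem.Chars.upper key
      if d.contains keyU then d else d.insert keyU value
    | _ => d   -- unreachable: '=' ∈ part, so split('=', 1) has exactly two pieces
  else d

def extract_cn_py_alt (subject : Option String) : Option String :=
  match subject with
  | none => none
  | some s =>
    if s.toList = [] then none   -- 'if not subject: return None'
    else
      let d := (PySem.Chars.splitOn s.toList [',']).foldl pvBStep PySem.Dict.empty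
      (d.get? ['C', 'N']).map String.ofList

-- ===== PRECONDITION & SPEC =====
def Spec_extract_cn_py (subject : Option String) (out : Option String) : Prop := out = extract_cn_py_alt subject
instance (subject : Option String) (out : Option String) : Decidable (Spec_extract_cn_py subject out) := by unfold Spec_extract_cn_py; infer_instance

-- ===== CLAIM (what is proved, stated in full; the proofs are below) =====
def Claim_equal_extract_cn_py : Prop := ∀ (subject : Option String), Dom_extract_cn_py subject → Spec_extract_cn_py subject (extract_cn_py subject)

-- ===== LEMMAS AND PROOFS =====

-- upperChar sends only '=' to '='
theorem pv_upperChar_eq_iff (c : Char) : PySem.Chars.upperChar c = '=' ↔ c = '=' := by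
  constructor
  · intro h
    by_contra hne
    simp only [PySem.Chars.upperChar] at h
    split_ifs at h with hl
    · simp only [PySem.Chars.islower, Bool.and_eq_true, decide_eq_true_eq, Char.le_def,
        UInt32.le_iff_toNat_le] at hl
      have hv : c.val.toNat = c.toNat := rfl
      have ha : ('a').val.toNat = 97 := rfl
      have hz : ('z').val.toNat = 122 := rfl
      rw [ha, hz, hv] at hl
      have h2 : (Char.ofNat (c.toNat - 32)).toNat = c.toNat - 32 := by
        rw [Char.toNat_ofNat, if_pos]
        exact Or.inl (by omega)
      rw [h] at h2
      have h3 : ('=').toNat = 61 := rfl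
      omega
    · exact hne h
  · intro h; subst h; decide

theorem pv_isIn_eq (s : List Char) : PySem.Chars.isIn ['='] s = true ↔ '=' ∈ s := by
  rw [PySem.Chars.isIn_iff_infix]
  exact List.singleton_infix_iff _ _

-- splitOnMax.go with maxsplit budget 0 dumps the remainder
theorem pv_go_zero (fuel : Nat) (l cur : List Char) (acc : List (List Char)) :
    PySem.Chars.splitOnMax.go ['='] fuel 0 l cur acc = ((cur.reverse ++ l) :: acc).reverse := by
  cases fuel with
  | zero => simp [PySem.Chars.splitOnMax.go]
  | succ n => cases l <;> simp [PySem.Chars.splitOnMax.go]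

-- splitOnMax.go with budget 1 splits at the first '='
theorem pv_go_one (fuel : Nat) : ∀ (l cur : List Char) (acc : List (List Char)),
    l.length < fuel →
    PySem.Chars.splitOnMax.go ['='] fuel 1 l cur acc =
      acc.reverse ++ (if '=' ∈ l
        then [cur.reverse ++ l.takeWhile (· != '='), (l.dropWhile (· != '=')).tail]
        else [cur.reverse ++ l]) := by
  induction fuel with
  | zero => intro l cur acc h; omega
  | succ n ih =>
    intro l cur acc h
    cases l with
    | nil => simp [PySem.Chars.splitOnMax.go]
    | cons c rest =>
      by_cases hc : c = '='
      · subst hc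
        simp only [PySem.Chars.splitOnMax.go, List.isPrefixOf, if_neg (by omega : ¬(1 : Nat) = 0)]
        simp [pv_go_zero]
      · have hpre : (['='] : List Char).isPrefixOf (c :: rest) = false := by
          simp [List.isPrefixOf]; exact fun h' => hc h'.symm
        simp only [PySem.Chars.splitOnMax.go, if_neg (by omega : ¬(1 : Nat) = 0), hpre,
          Bool.false_eq_true, if_false]
        rw [ih rest (c :: cur) acc (by simpa using Nat.lt_of_succ_lt_succ h)]
        have hm : ('=' ∈ c :: rest) ↔ ('=' ∈ rest) := by
          simp [List.mem_cons, eq_comm, hc]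
        have hb : (c != '=') = true := by simpa using hc
        by_cases hr : '=' ∈ rest
        · simp [hr, hm.mpr hr, hb]
        · have : ¬ ('=' ∈ c :: rest) := fun h' => hr (hm.mp h')
          simp [hr, this]

theorem pv_splitOnMax_one (s : List Char) :
    PySem.Chars.splitOnMax s ['='] 1 =
      if '=' ∈ s then [s.takeWhile (· != '='), (s.dropWhile (· != '=')).tail] else [s] := by
  rw [PySem.Chars.splitOnMax, if_neg (by omega : ¬(1 : Int) < 0), Int.toNat_one]
  rw [pv_go_one (s.length + 1) s [] [] (by omega)]
  simp

-- A's per-part test, on the already-stripped part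
def pvAcond (s : List Char) : Bool := PySem.Chars.startswith (PySem.Chars.upper s) ['C', 'N', '=']

-- pvAScan on a single part
theorem pv_AScan_cons (p : List Char) (rest : List (List Char)) :
    pvAScan (p :: rest) =
      (if pvAcond (PySem.Chars.strip p)
        then some (PySem.List.slice (PySem.Chars.strip p) (some 3) none)
        else none).or (pvAScan rest) := by
  simp only [pvAScan, pvAcond]
  by_cases h : PySem.Chars.startswith (PySem.Chars.upper (PySem.Chars.strip p)) ['C', 'N', '='] <;>
    simp [h]

-- what one B-step does to the 'CN' entry of the dict: exactly A's per-part test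
-- the per-part fact: when the part contains '=', A's prefix test holds exactly when the
-- uppercased key before the first '=' is "CN", and then the rest after '=' is part[3:]
theorem pv_part_facts (s : List Char) (hin : '=' ∈ s) :
    (pvAcond s = true ↔ PySem.Chars.upper (s.takeWhile (· != '=')) = ['C', 'N']) ∧
    (pvAcond s = true → (s.dropWhile (· != '=')).tail = s.drop 3) := by
  rcases s with _ | ⟨a, _ | ⟨b, _ | ⟨c, t⟩⟩⟩
  · cases hin
  · have ha : a = '=' := (by simpa using hin : '=' = a).symm
    subst ha
    refine ⟨?_, ?_⟩ <;>
      simp [pvAcond, PySem.Chars.startswith, PySem.Chars.upper, List.isPrefixOf]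
  · refine ⟨?_, ?_⟩ <;>
      simp only [pvAcond, PySem.Chars.startswith, PySem.Chars.upper, List.map, List.isPrefixOf,
        Bool.and_false, Bool.false_eq_true, false_iff, false_implies]
    rcases (by simpa using hin : '=' = a ∨ '=' = b) with ha | hb
    · rw [← ha]; simp
    · by_cases ha2 : a = '='
      · subst ha2; simp
      · have ha' : (a != '=') = true := by simpa using ha2
        rw [← hb]; simp [ha']
  · by_cases ha : a = '='
    · subst ha
      refine ⟨?_, ?_⟩ <;>
        simp [pvAcond, PySem.Chars.startswith, PySem.Chars.upper, List.isPrefixOf,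
          show ('C' == PySem.Chars.upperChar '=') = false by decide]
    · have ha' : (a != '=') = true := by simpa using ha
      by_cases hb : b = '='
      · subst hb
        refine ⟨?_, ?_⟩ <;>
          simp [pvAcond, PySem.Chars.startswith, PySem.Chars.upper, List.isPrefixOf, ha',
            show ('N' == PySem.Chars.upperChar '=') = false by decide]
      · have hb' : (b != '=') = true := by simpa using hb
        by_cases hc : c = '='
        · subst hc
          have ht : (a :: b :: '=' :: t).takeWhile (· != '=') = [a, b] := by
            simp [ha', hb']
          constructor
          · rw [ht]
            simp only [pvAcond, PySem.Chars.startswith, PySem.Chars.upper, List.map,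
              List.isPrefixOf, show ('=' == PySem.Chars.upperChar '=') = true from rfl,
              Bool.and_true, Bool.and_eq_true, beq_iff_eq, List.cons.injEq, and_true]
            constructor
            · rintro ⟨h1, h2⟩; exact ⟨h1.symm, h2.symm⟩
            · rintro ⟨h1, h2⟩; exact ⟨h1.symm, h2.symm⟩
          · intro _
            simp [ha', hb']
        · have hc' : (c != '=') = true := by simpa using hc
          have hcu : ('=' == PySem.Chars.upperChar c) = false := by
            rw [beq_eq_false_iff_ne]
            intro h
            exact hc ((pv_upperChar_eq_iff c).mp h.symm)
          refine ⟨?_, ?_⟩ <;>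
            simp [pvAcond, PySem.Chars.startswith, PySem.Chars.upper, List.isPrefixOf,
              ha', hb', hc', hcu]

theorem pv_step_get (d : PySem.Dict (List Char) (List Char)) (p : List Char) :
    (pvBStep d p).get? ['C', 'N'] =
      (d.get? ['C', 'N']).or
        (if pvAcond (PySem.Chars.strip p)
          then some (PySem.List.slice (PySem.Chars.strip p) (some 3) none)
          else none) := by
  simp only [pvBStep]
  generalize PySem.Chars.strip p = s
  have hslice : PySem.List.slice s (some 3) none = s.drop 3 := by simp [pysem]
  by_cases hin : '=' ∈ s
  · have hIn : PySem.Chars.isIn ['='] s = true := (pv_isIn_eq s).mpr hin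
    obtain ⟨hiff, hdrop⟩ := pv_part_facts s hin
    simp only [hIn, if_true, pv_splitOnMax_one, if_pos hin]
    by_cases hk : PySem.Chars.upper (s.takeWhile (· != '=')) = ['C', 'N']
    · have hA : pvAcond s = true := hiff.mpr hk
      rw [hk]
      by_cases hc : PySem.Dict.contains d ['C', 'N']
      · have : (d.get? ['C', 'N']).isSome := by
          rw [← PySem.Dict.contains_eq_isSome_get?]; exact hc
        simp only [hc, if_true]
        cases hg : d.get? ['C', 'N'] with
        | none => rw [hg] at this; simp at this
        | some v => simp
      · have hnone : d.get? ['C', 'N'] = none := by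
          cases hg : d.get? ['C', 'N'] with
          | none => rfl
          | some v =>
            exfalso
            have : (d.get? ['C', 'N']).isSome := by rw [hg]; rfl
            rw [← PySem.Dict.contains_eq_isSome_get?] at this
            exact hc this
        simp only [hc, if_false, Bool.false_eq_true]
        rw [PySem.Dict.get?_insert_self, hnone, hA, if_pos rfl, hslice, hdrop hA]
        rfl
    · have hA : pvAcond s = false := by
        cases hA : pvAcond s with
        | true => exact absurd (hiff.mp hA) hk
        | false => rfl
      by_cases hc : PySem.Dict.contains d (PySem.Chars.upper (s.takeWhile (· != '=')))
      · simp [hc, hA]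
      · simp only [hc, if_false, Bool.false_eq_true]
        rw [PySem.Dict.get?_insert_of_ne _ _
          (show (['C', 'N'] : List Char) ≠ PySem.Chars.upper (s.takeWhile (· != '=')) from
            fun h => hk h.symm), hA]
        simp
  · have hIn : PySem.Chars.isIn ['='] s = false := by
      cases h : PySem.Chars.isIn ['='] s with
      | false => rfl
      | true => exact absurd ((pv_isIn_eq s).mp h) hin
    have hA : pvAcond s = false := by
      cases hA : pvAcond s with
      | false => rfl
      | true =>
        exfalso
        apply hin
        simp only [pvAcond, PySem.Chars.startswith, PySem.Chars.upper] at hA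
        match s, hA with
        | [], hA => simp at hA
        | [a], hA => simp [List.map] at hA
        | [a, b], hA => simp [List.map, List.isPrefixOf] at hA
        | a :: b :: c :: t, hA =>
          have h1 : ('=' == PySem.Chars.upperChar c) = true := by
            simp only [List.map, List.isPrefixOf, Bool.and_eq_true] at hA
            exact hA.2.2.1
          have hc : c = '=' := (pv_upperChar_eq_iff c).mp (beq_iff_eq.mp h1).symm
          simp [hc]
    rw [hIn, hA]
    simp

-- the whole fold, relative to an arbitrary starting dict
theorem pv_loop (parts : List (List Char)) :
    ∀ d : PySem.Dict (List Char) (List Char),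
      (parts.foldl pvBStep d).get? ['C', 'N'] = (d.get? ['C', 'N']).or (pvAScan parts) := by
  induction parts with
  | nil => intro d; simp [pvAScan]
  | cons p rest ih =>
    intro d
    rw [List.foldl_cons, ih, pv_step_get, pv_AScan_cons, Option.or_assoc]

-- ===== VERDICT (by name: the statement is the Claim_ definition above) =====
theorem extract_cn_py_spec : Claim_equal_extract_cn_py := by
  intro subject _
  unfold Spec_extract_cn_py
  cases subject with
  | none => rfl
  | some s =>
    simp only [extract_cn_py, extract_cn_py_alt]
    by_cases h : s.toList = []
    · simp [h]
    · simp only [if_neg h]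
      rw [pv_loop]
      simp [PySem.Dict.empty, PySem.Dict.get?]
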